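-- pv_equiv track=rewrite | github.com/dlsnort/Baidu-2020-Language-and-Intelligent-Technology-Competition-Relation-Extraction-rank15 | rel_extract/NER_CRF.py | cut_buff
-- ===== SOURCE A (Python) =====
-- def cut_buff(info):
--     buff=""
--     tokens=[]
--     for e in info:
--         if (e.isdigit() and (buff.isdigit() or buff=='')):
--             buff+=e
--         elif (e.isalpha() and (buff.isalpha() or buff=='')):
--             buff+=e
--         else:
--             if buff!="":
--                 tokens.append(buff)
--             buff=""
--             if not (e.isdigit() or e.isalpha()):
--                 tokens.append(e)
--             else:
--                 buff+=e
--
--     if buff!="":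
--         tokens.append(buff)
--     return tokens
-- ===== SOURCE B (Python) =====
-- def cut_buff(info):
--     def cls(c):
--         return 1 if c.isdigit() else 2 if c.isalpha() else 0
--
--     # stage 1: split the string into maximal runs of equal character class
--     groups = []
--     for c in info:
--         if groups and cls(c) == groups[-1][0]:
--             groups[-1][1].append(c)
--         else:
--             groups.append((cls(c), [c]))
--
--     # stage 2: digit/alpha runs become one token, runs of other chars explode into single chars
--     out = []
--     for k, chars in groups:
--         if k == 0:
--             out.extend(chars)
--         else:
--             out.append(''.join(chars))
--     return out
-- ===== Notes on version B (the rewrite author's own statement) =====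
-- stated objective: faster
-- what changed: B works in two staged passes: it first splits the string into maximal runs of equal character class (grouping even the 'other' characters into runs, which A never forms), then renders the group list, exploding class-0 runs into single characters; A interleaves buffering, re-scanning the buffer with isdigit/isalpha, and emission in one pass.
import Mathlib
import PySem

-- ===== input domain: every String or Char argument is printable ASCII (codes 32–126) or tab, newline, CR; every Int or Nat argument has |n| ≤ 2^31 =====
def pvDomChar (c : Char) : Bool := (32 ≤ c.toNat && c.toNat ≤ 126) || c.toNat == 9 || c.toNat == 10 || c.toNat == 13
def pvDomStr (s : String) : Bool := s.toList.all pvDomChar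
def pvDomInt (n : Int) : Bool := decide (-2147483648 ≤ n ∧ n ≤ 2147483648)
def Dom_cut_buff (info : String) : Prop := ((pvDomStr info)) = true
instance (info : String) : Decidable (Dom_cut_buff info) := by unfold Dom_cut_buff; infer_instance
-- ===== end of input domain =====

-- B replaces A's single interleaved pass (which re-scans the buffer with isdigit/isalpha at
-- every character) by two staged passes: group into maximal equal-class runs, then render them.


-- ===== PORT A =====
-- loop body of A: buff is the pending run (List Char, appended left-to-right), tokens the output.
-- `tokens.append(buff)` materialises the run with String.ofList (exact: buff's chars in order).
def cutBuffStepA (st : List Char × List String) (e : Char) : List Char × List String :=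
  if PySem.Chars.isdigit e && (PySem.Chars.strIsdigit st.1 || st.1 == []) then
    (st.1 ++ [e], st.2)
  else if PySem.Chars.isalpha e && (PySem.Chars.strIsalpha st.1 || st.1 == []) then
    (st.1 ++ [e], st.2)
  else
    let tokens := if st.1 ≠ [] then st.2 ++ [String.ofList st.1] else st.2
    if !(PySem.Chars.isdigit e || PySem.Chars.isalpha e) then
      ([], tokens ++ [String.ofList [e]])
    else
      ([e], tokens)

def cut_buff (info : String) : List String :=
  let st := info.toList.foldl cutBuffStepA ([], [])
  if st.1 ≠ [] then st.2 ++ [String.ofList st.1] else st.2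

-- ===== PORT B =====
-- B's `cls(c)`
def cutBuffCls (c : Char) : Int :=
  if PySem.Chars.isdigit c then 1 else if PySem.Chars.isalpha c then 2 else 0

-- stage-1 loop body: groups[-1] is read with getLast?, the in-place mutation of the last
-- group's char list becomes dropLast ++ [updated last]
def cutBuffStepB (groups : List (Int × List Char)) (c : Char) : List (Int × List Char) :=
  match groups.getLast? with
  | some g =>
      if cutBuffCls c == g.1 then groups.dropLast ++ [(g.1, g.2 ++ [c])]
      else groups ++ [(cutBuffCls c, [c])]
  | none => groups ++ [(cutBuffCls c, [c])]

-- stage-2 loop body: `out.extend(chars)` / `out.append(''.join(chars))`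
def cutBuffRenderStep (out : List String) (g : Int × List Char) : List String :=
  if g.1 == 0 then out ++ g.2.map (fun c => String.ofList [c]) else out ++ [String.ofList g.2]

def cut_buff_alt (info : String) : List String :=
  let groups := info.toList.foldl cutBuffStepB []
  groups.foldl cutBuffRenderStep []

-- ===== PRECONDITION & SPEC =====
def Spec_cut_buff (info : String) (out : List String) : Prop := out = cut_buff_alt info
instance (info : String) (out : List String) : Decidable (Spec_cut_buff info out) := by unfold Spec_cut_buff; infer_instance

-- ===== CLAIM (what is proved, stated in full; the proofs are below) =====
def Claim_equal_cut_buff : Prop := ∀ (info : String), Dom_cut_buff info → Spec_cut_buff info (cut_buff info)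

-- ===== LEMMAS AND PROOFS =====

-- what stage 2 makes of one group
def cutBuffRenderOne (g : Int × List Char) : List String :=
  if g.1 == 0 then g.2.map (fun c => String.ofList [c]) else [String.ofList g.2]

theorem cutBuff_render_eq (gs : List (Int × List Char)) (acc : List String) :
    gs.foldl cutBuffRenderStep acc = acc ++ gs.flatMap cutBuffRenderOne := by
  have h : cutBuffRenderStep = fun out g => out ++ cutBuffRenderOne g := by
    funext out g
    simp only [cutBuffRenderStep, cutBuffRenderOne]
    split <;> rfl
  rw [h]
  exact PySem.List.foldl_append_eq_flatMap _ _ _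

theorem cutBuff_digit_not_alpha (c : Char) (h : PySem.Chars.isdigit c = true) :
    PySem.Chars.isalpha c = false := by
  simp [PySem.Chars.isdigit, Char.le_def, UInt32.le_iff_toNat_le] at h
  simp [PySem.Chars.isalpha, PySem.Chars.isupper, PySem.Chars.islower, Char.le_def,
    UInt32.le_iff_toNat_le]
  omega

theorem cutBuff_strIsdigit_append {buff : List Char} {e : Char}
    (h : PySem.Chars.strIsdigit buff = true) (he : PySem.Chars.isdigit e = true) :
    PySem.Chars.strIsdigit (buff ++ [e]) = true := by
  simp [PySem.Chars.strIsdigit] at *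
  exact ⟨h.2, he⟩

theorem cutBuff_strIsalpha_append {buff : List Char} {e : Char}
    (h : PySem.Chars.strIsalpha buff = true) (he : PySem.Chars.isalpha e = true) :
    PySem.Chars.strIsalpha (buff ++ [e]) = true := by
  simp [PySem.Chars.strIsalpha] at *
  exact ⟨h.2, he⟩

theorem cutBuff_strIsdigit_ne_nil {buff : List Char} (h : PySem.Chars.strIsdigit buff = true) :
    buff ≠ [] := by
  simp [PySem.Chars.strIsdigit] at h; exact h.1

theorem cutBuff_strIsalpha_ne_nil {buff : List Char} (h : PySem.Chars.strIsalpha buff = true) :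
    buff ≠ [] := by
  simp [PySem.Chars.strIsalpha] at h; exact h.1

theorem cutBuff_strIsdigit_not_alpha {buff : List Char} (h : PySem.Chars.strIsdigit buff = true) :
    PySem.Chars.strIsalpha buff = false := by
  simp [PySem.Chars.strIsdigit] at h
  rcases buff with _ | ⟨c, cs⟩
  · simp at h
  · simp at h
    simp [PySem.Chars.strIsalpha, cutBuff_digit_not_alpha c h.1]

theorem cutBuff_strIsalpha_not_digit {buff : List Char} (h : PySem.Chars.strIsalpha buff = true) :
    PySem.Chars.strIsdigit buff = false := by
  simp [PySem.Chars.strIsalpha] at h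
  rcases buff with _ | ⟨c, cs⟩
  · simp at h
  · simp at h
    have hc : PySem.Chars.isdigit c = false := by
      by_contra hc
      simp at hc
      have := cutBuff_digit_not_alpha c hc
      simp [this] at h
    simp [PySem.Chars.strIsdigit, hc]

-- the relation between A's (buff, tokens) and B's group list:
-- either nothing was read, or B's last group is a class-0 run (then A's buffer is empty and
-- A's tokens already render the whole group list), or B's last group is the digit/alpha run
-- that A is still buffering (then A's tokens render the groups before it).
def CutBuffInv (buff : List Char) (tokens : List String) (groups : List (Int × List Char)) : Prop :=
  (groups = [] ∧ buff = [] ∧ tokens = []) ∨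
  (∃ gs cs, groups = gs ++ [(0, cs)] ∧ buff = [] ∧
    tokens = (gs ++ [(0, cs)]).flatMap cutBuffRenderOne) ∨
  (∃ gs cs k, groups = gs ++ [(k, cs)] ∧
    ((k = 1 ∧ PySem.Chars.strIsdigit cs = true) ∨ (k = 2 ∧ PySem.Chars.strIsalpha cs = true)) ∧
    buff = cs ∧ tokens = gs.flatMap cutBuffRenderOne)

-- A's final flush applied to a state satisfying the invariant gives B's rendering
theorem cutBuff_final_eq {buff : List Char} {tokens : List String}
    {groups : List (Int × List Char)} (h : CutBuffInv buff tokens groups) :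
    (if buff ≠ [] then tokens ++ [String.ofList buff] else tokens)
      = groups.flatMap cutBuffRenderOne := by
  rcases h with ⟨hg, hb, ht⟩ | ⟨gs, cs, hg, hb, ht⟩ | ⟨gs, cs, k, hg, hk, hb, ht⟩
  · simp [hg, hb, ht]
  · simp [hg, hb, ht]
  · subst hb
    have hne : buff ≠ [] := by
      rcases hk with ⟨_, h2⟩ | ⟨_, h2⟩
      · exact cutBuff_strIsdigit_ne_nil h2
      · exact cutBuff_strIsalpha_ne_nil h2
    have hk0 : (k == (0:Int)) = false := by
      rcases hk with ⟨h1, _⟩ | ⟨h1, _⟩ <;> simp [h1]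
    simp [hne, hg, ht, cutBuffRenderOne, hk0]

-- one step of each loop preserves the relation
theorem cutBuff_step_inv {buff : List Char} {tokens : List String}
    {groups : List (Int × List Char)} (e : Char) (h : CutBuffInv buff tokens groups) :
    CutBuffInv (cutBuffStepA (buff, tokens) e).1 (cutBuffStepA (buff, tokens) e).2
      (cutBuffStepB groups e) := by
  by_cases hd : PySem.Chars.isdigit e = true
  · have hna := cutBuff_digit_not_alpha e hd
    have hcls : cutBuffCls e = 1 := by simp [cutBuffCls, hd]
    rcases h with ⟨hg, hb, ht⟩ | ⟨gs, cs, hg, hb, ht⟩ | ⟨gs, cs, k, hg, hk, hb, ht⟩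
    · -- nothing read: both start a digit run
      subst hg hb ht
      simp only [cutBuffStepA, cutBuffStepB, hd, hcls]
      simp
      exact Or.inr (Or.inr ⟨[], [e], 1, by simp, Or.inl ⟨rfl, by simp [PySem.Chars.strIsdigit, hd]⟩, rfl, by simp⟩)
    · -- last group class 0: A starts a digit run, B appends a new group
      subst hg hb ht
      simp only [cutBuffStepA, cutBuffStepB, hd, hna, hcls]
      simp
      exact Or.inr (Or.inr ⟨gs ++ [(0, cs)], [e], 1, by simp,
        Or.inl ⟨rfl, by simp [PySem.Chars.strIsdigit, hd]⟩, rfl, by simp⟩)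
    · subst hg hb ht
      rcases hk with ⟨hk1, hcs⟩ | ⟨hk2, hcs⟩
      · -- digit run continues in both
        subst hk1
        simp only [cutBuffStepA, cutBuffStepB, hd, hcs, hcls]
        simp
        exact Or.inr (Or.inr ⟨gs, buff ++ [e], 1, by simp,
          Or.inl ⟨rfl, cutBuff_strIsdigit_append hcs hd⟩, rfl, rfl⟩)
      · -- alpha run flushed, digit run started in both
        subst hk2
        have hnd := cutBuff_strIsalpha_not_digit hcs
        have hne := cutBuff_strIsalpha_ne_nil hcs
        simp only [cutBuffStepA, cutBuffStepB, hd, hna, hnd, hcs, hcls]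
        simp [hne]
        exact Or.inr (Or.inr ⟨gs ++ [(2, buff)], [e], 1, by simp,
          Or.inl ⟨rfl, by simp [PySem.Chars.strIsdigit, hd]⟩, rfl,
          by simp [cutBuffRenderOne]⟩)
  · simp only [Bool.not_eq_true] at hd
    by_cases ha : PySem.Chars.isalpha e = true
    · have hcls : cutBuffCls e = 2 := by simp [cutBuffCls, hd, ha]
      rcases h with ⟨hg, hb, ht⟩ | ⟨gs, cs, hg, hb, ht⟩ | ⟨gs, cs, k, hg, hk, hb, ht⟩
      · subst hg hb ht
        simp only [cutBuffStepA, cutBuffStepB, hd, ha, hcls]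
        simp
        exact Or.inr (Or.inr ⟨[], [e], 2, by simp, Or.inr ⟨rfl, by simp [PySem.Chars.strIsalpha, ha]⟩, rfl, by simp⟩)
      · subst hg hb ht
        simp only [cutBuffStepA, cutBuffStepB, hd, ha, hcls]
        simp
        exact Or.inr (Or.inr ⟨gs ++ [(0, cs)], [e], 2, by simp,
          Or.inr ⟨rfl, by simp [PySem.Chars.strIsalpha, ha]⟩, rfl, by simp⟩)
      · subst hg hb ht
        rcases hk with ⟨hk1, hcs⟩ | ⟨hk2, hcs⟩
        · -- digit run flushed, alpha run started in both
          subst hk1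
          have hnal := cutBuff_strIsdigit_not_alpha hcs
          have hne := cutBuff_strIsdigit_ne_nil hcs
          simp only [cutBuffStepA, cutBuffStepB, hd, ha, hnal, hcs, hcls]
          simp [hne]
          exact Or.inr (Or.inr ⟨gs ++ [(1, buff)], [e], 2, by simp,
            Or.inr ⟨rfl, by simp [PySem.Chars.strIsalpha, ha]⟩, rfl,
            by simp [cutBuffRenderOne]⟩)
        · -- alpha run continues in both
          subst hk2
          simp only [cutBuffStepA, cutBuffStepB, hd, ha, hcs, hcls]
          simp
          exact Or.inr (Or.inr ⟨gs, buff ++ [e], 2, by simp,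
            Or.inr ⟨rfl, cutBuff_strIsalpha_append hcs ha⟩, rfl, rfl⟩)
    · simp only [Bool.not_eq_true] at ha
      have hcls : cutBuffCls e = 0 := by simp [cutBuffCls, hd, ha]
      rcases h with ⟨hg, hb, ht⟩ | ⟨gs, cs, hg, hb, ht⟩ | ⟨gs, cs, k, hg, hk, hb, ht⟩
      · -- nothing read: A emits e alone, B starts a class-0 run
        subst hg hb ht
        simp only [cutBuffStepA, cutBuffStepB, hd, ha, hcls]
        simp
        exact Or.inr (Or.inl ⟨[], [e], by simp, rfl, by simp [cutBuffRenderOne]⟩)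
      · -- class-0 run continues: A emits e alone, B appends to the last group
        subst hg hb ht
        simp only [cutBuffStepA, cutBuffStepB, hd, ha, hcls]
        simp
        exact Or.inr (Or.inl ⟨gs, cs ++ [e], by simp, rfl, by simp [cutBuffRenderOne]⟩)
      · -- run flushed and e emitted alone; B starts a class-0 run
        subst hg hb ht
        have hne : buff ≠ [] := by
          rcases hk with ⟨_, h2⟩ | ⟨_, h2⟩
          · exact cutBuff_strIsdigit_ne_nil h2
          · exact cutBuff_strIsalpha_ne_nil h2
        have hk0 : ((0:Int) == k) = false := by
          rcases hk with ⟨h1, _⟩ | ⟨h1, _⟩ <;> simp [h1]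
        have hk0' : (k == (0:Int)) = false := by
          rcases hk with ⟨h1, _⟩ | ⟨h1, _⟩ <;> simp [h1]
        simp only [cutBuffStepA, cutBuffStepB, hd, ha, hcls]
        simp [hne, hk0]
        exact Or.inr (Or.inl ⟨gs ++ [(k, buff)], [e], by simp, rfl,
          by simp [cutBuffRenderOne, hk0']⟩)

theorem cutBuff_loop_inv :
    ∀ (l : List Char) (buff : List Char) (tokens : List String)
      (groups : List (Int × List Char)), CutBuffInv buff tokens groups →
      CutBuffInv (l.foldl cutBuffStepA (buff, tokens)).1
        (l.foldl cutBuffStepA (buff, tokens)).2 (l.foldl cutBuffStepB groups) := by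
  intro l
  induction l with
  | nil => intro buff tokens groups h; exact h
  | cons e tl ih =>
    intro buff tokens groups h
    simp only [List.foldl_cons]
    have h' := cutBuff_step_inv e h
    have := ih (cutBuffStepA (buff, tokens) e).1 (cutBuffStepA (buff, tokens) e).2
      (cutBuffStepB groups e) h'
    simpa using this

-- ===== VERDICT (by name: the statement is the Claim_ definition above) =====
theorem cut_buff_spec : Claim_equal_cut_buff := by
  intro info _
  unfold Spec_cut_buff cut_buff cut_buff_alt
  have h := cutBuff_loop_inv info.toList [] [] [] (Or.inl ⟨rfl, rfl, rfl⟩)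
  rw [cutBuff_render_eq]
  simpa using cutBuff_final_eq h
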